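-- pv_equiv track=rewrite | github.com/zhuang002/yidan-poetry | main.py | get_rythm
-- ===== SOURCE A (Python) =====
-- vowels = ['a', 'e', 'i', 'o', 'u']
--
-- def get_rythm(line: str) -> str:
--     last_word = line.split(' ')[-1].lower()
--     for i in range(len(last_word) - 1, -1, -1):
--         c = last_word[i]
--         if c in vowels:
--             if c == last_word[-1]:
--                 return c
--             else:
--                 return last_word[i + 1:]
--     return last_word
-- ===== SOURCE B (Python) =====
-- vowels = ['a', 'e', 'i', 'o', 'u']
--
-- def get_rythm(line: str) -> str:
--     last_word = line.split(' ')[-1].lower()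
--     idx = max(last_word.rfind(v) for v in vowels)
--     if 0 <= idx == len(last_word) - 1:
--         return last_word[idx]
--     return last_word[idx + 1:]
-- ===== Notes on version B (the rewrite author's own statement) =====
-- stated objective: simpler
-- what changed: Replaces A's hand-written backward index loop (with early returns) by computing the last-vowel index directly as a max of the five str.rfind values and returning a single slice, with the end-vowel case as one guard.
import Mathlib
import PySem

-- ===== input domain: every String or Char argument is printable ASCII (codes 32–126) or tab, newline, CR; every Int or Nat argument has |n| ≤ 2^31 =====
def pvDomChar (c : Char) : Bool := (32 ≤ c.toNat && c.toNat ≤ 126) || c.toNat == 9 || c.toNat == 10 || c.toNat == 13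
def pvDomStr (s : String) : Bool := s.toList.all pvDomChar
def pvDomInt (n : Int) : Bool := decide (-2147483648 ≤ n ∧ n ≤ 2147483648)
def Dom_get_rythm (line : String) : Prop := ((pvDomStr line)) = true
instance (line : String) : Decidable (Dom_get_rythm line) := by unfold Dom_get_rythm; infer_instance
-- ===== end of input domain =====

-- B replaces A's hand-written backward scan by computing the last-vowel index as a max of rfind calls
-- and returning a single slice (objective: simpler — no explicit loop).

def pvVowels : List Char := ['a', 'e', 'i', 'o', 'u']

-- ===== PORT A =====
-- the 'for i in range(len(last_word)-1, -1, -1)' loop with early returns; fuel i means indices i-1 … 0 remain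
def pvLoopA (w : List Char) : Nat → String
  | 0 => String.ofList w
  | i + 1 =>
    -- i < w.length on every call from get_rythm, so pyGetD is Python's w[i] (exact)
    let c := PySem.List.pyGetD w (i : Int) ' '
    if pvVowels.contains c then
      -- w is nonempty here (it has a vowel), so w[-1] never raises
      if c = PySem.List.pyGetD w (-1) ' ' then String.ofList [c]
      else String.ofList (PySem.List.slice w (some ((i : Int) + 1)) none)
    else pvLoopA w i

def get_rythm (line : String) : String :=
  -- split(' ') with a nonempty separator is always some, and its result is a nonempty list, so [-1] never raises
  let parts := (PySem.Chars.split? line.toList [' ']).getD []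
  let last_word := PySem.Chars.lower (PySem.List.pyGetD parts (-1) [])
  pvLoopA last_word last_word.length

-- ===== PORT B =====
def get_rythm_alt (line : String) : String :=
  let parts := (PySem.Chars.split? line.toList [' ']).getD []
  let last_word := PySem.Chars.lower (PySem.List.pyGetD parts (-1) [])
  -- max over the 5 rfind values; the generator is nonempty so Python's max never raises (getD unreached)
  let idx := (PySem.List.max? (pvVowels.map (fun v => PySem.Chars.rfind last_word [v])) id).getD (-1)
  if 0 ≤ idx ∧ idx = (last_word.length : Int) - 1 then
    -- the guard puts idx in range, so last_word[idx] never raises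
    String.ofList [PySem.List.pyGetD last_word idx ' ']
  else
    String.ofList (PySem.List.slice last_word (some (idx + 1)) none)

-- ===== PRECONDITION & SPEC =====
def Spec_get_rythm (line : String) (out : String) : Prop := out = get_rythm_alt line
instance (line : String) (out : String) : Decidable (Spec_get_rythm line out) := by unfold Spec_get_rythm; infer_instance

-- ===== CLAIM (what is proved, stated in full; the proofs are below) =====
def Claim_equal_get_rythm : Prop := ∀ (line : String), Dom_get_rythm line → Spec_get_rythm line (get_rythm line)

-- ===== LEMMAS AND PROOFS =====

def pvIsV (c : Char) : Bool := pvVowels.contains c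

-- greatest j < k with w[j] = c (mirrors rfind.go's scan)
def pvGci (c : Char) (w : List Char) : Nat → Option Nat
  | 0 => none
  | k + 1 => if w[k]? = some c then some k else pvGci c w k

-- greatest j < k with w[j] a vowel
def pvGvi (w : List Char) : Nat → Option Nat
  | 0 => none
  | k + 1 => if (w[k]?.any pvIsV) = true then some k else pvGvi w k

def pvOI : Option Nat → Int
  | none => -1
  | some j => j

lemma pvOISome (j : Nat) : pvOI (some j) = (j : Int) := rfl

lemma pvGciSucc (c : Char) (w : List Char) (k : Nat) :
    pvGci c w (k + 1) = if w[k]? = some c then some k else pvGci c w k := rfl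

lemma pvGviSucc (w : List Char) (k : Nat) :
    pvGvi w (k + 1) = if (w[k]?.any pvIsV) = true then some k else pvGvi w k := rfl

lemma pvPfx (c : Char) (l : List Char) : [c].isPrefixOf l = (l[0]? == some c) := by
  cases l with
  | nil => simp [List.isPrefixOf]
  | cons x xs => simp [List.isPrefixOf, BEq.comm]

lemma pvGoEq (c : Char) (w : List Char) : ∀ i, PySem.Chars.rfind.go w [c] i = pvOI (pvGci c w (i + 1)) := by
  intro i
  induction i with
  | zero =>
    rw [show PySem.Chars.rfind.go w [c] 0 = if [c].isPrefixOf w then (0:Int) else -1 from by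
      simp [PySem.Chars.rfind.go]]
    rw [pvPfx, pvGciSucc]
    by_cases h : w[0]? = some c
    · rw [if_pos h, if_pos (by simp [h])]; rfl
    · rw [if_neg h, if_neg (by simp [h])]; rfl
  | succ j ih =>
    have hgo : PySem.Chars.rfind.go w [c] (j + 1) =
        if [c].isPrefixOf (w.drop (j + 1)) then ((j : Int) + 1) else PySem.Chars.rfind.go w [c] j := by
      simp [PySem.Chars.rfind.go]
    have hd : (w.drop (j + 1))[0]? = w[j + 1]? := by
      rw [List.getElem?_drop]
    rw [hgo, pvPfx, hd, pvGciSucc c w (j + 1)]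
    by_cases h : w[j + 1]? = some c
    · rw [if_pos (by simp [h]), if_pos h]; rfl
    · rw [if_neg (by simp [h]), if_neg h, ih]

lemma pvRfindEq (c : Char) (w : List Char) : PySem.Chars.rfind w [c] = pvOI (pvGci c w w.length) := by
  have h := pvGoEq c w w.length
  have : pvGci c w (w.length + 1) = pvGci c w w.length := by
    rw [pvGciSucc, if_neg (by simp)]
  rw [PySem.Chars.rfind, h, this]

lemma pvGciLt (c : Char) (w : List Char) : ∀ k, pvOI (pvGci c w k) < (k : Int) := by
  intro k
  induction k with
  | zero => simp [pvGci, pvOI]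
  | succ j ih =>
    rw [pvGciSucc]
    by_cases h : w[j]? = some c
    · rw [if_pos h]; simp [pvOI]
    · rw [if_neg h]; omega

lemma pvNotV {ch : Char} (hv : ¬ pvIsV ch = true) (c : Char) (hc : pvIsV c = true) :
    ¬ (some ch = some c) := by
  intro h
  cases Option.some.inj h
  exact hv hc

lemma pvMerge (w : List Char) : ∀ k,
    max (max (max (max (pvOI (pvGci 'a' w k)) (pvOI (pvGci 'e' w k))) (pvOI (pvGci 'i' w k)))
      (pvOI (pvGci 'o' w k))) (pvOI (pvGci 'u' w k)) = pvOI (pvGvi w k) := by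
  intro k
  induction k with
  | zero => simp [pvGci, pvGvi, pvOI]
  | succ j ih =>
    have ha := pvGciLt 'a' w j
    have he := pvGciLt 'e' w j
    have hi := pvGciLt 'i' w j
    have ho := pvGciLt 'o' w j
    have hu := pvGciLt 'u' w j
    rw [pvGciSucc, pvGciSucc, pvGciSucc, pvGciSucc, pvGciSucc, pvGviSucc]
    cases hw : w[j]? with
    | none =>
      rw [if_neg (by simp), if_neg (by simp), if_neg (by simp), if_neg (by simp),
        if_neg (by simp), if_neg (by simp)]
      exact ih
    | some ch =>
      rw [Option.any_some]
      by_cases hv : pvIsV ch = true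
      case pos =>
        have h5 : ch = 'a' ∨ ch = 'e' ∨ ch = 'i' ∨ ch = 'o' ∨ ch = 'u' := by
          have h := hv
          simp only [pvIsV, pvVowels, List.contains_eq_mem, List.mem_cons,
            List.not_mem_nil, or_false, decide_eq_true_eq] at h
          exact h
        rw [if_pos hv]
        rcases h5 with rfl | rfl | rfl | rfl | rfl <;>
          [ (rw [if_pos rfl, if_neg (by decide), if_neg (by decide), if_neg (by decide),
              if_neg (by decide)]);
            (rw [if_neg (by decide), if_pos rfl, if_neg (by decide), if_neg (by decide),
              if_neg (by decide)]);
            (rw [if_neg (by decide), if_neg (by decide), if_pos rfl, if_neg (by decide),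
              if_neg (by decide)]);
            (rw [if_neg (by decide), if_neg (by decide), if_neg (by decide), if_pos rfl,
              if_neg (by decide)]);
            (rw [if_neg (by decide), if_neg (by decide), if_neg (by decide), if_neg (by decide),
              if_pos rfl])] <;>
          simp only [pvOISome] <;> omega
      case neg =>
        rw [if_neg hv,
          if_neg (pvNotV hv 'a' (by decide)), if_neg (pvNotV hv 'e' (by decide)),
          if_neg (pvNotV hv 'i' (by decide)), if_neg (pvNotV hv 'o' (by decide)),
          if_neg (pvNotV hv 'u' (by decide))]
        exact ih

lemma pvMaxCons (a x : Int) (ys : List Int) :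
    PySem.List.max? (a :: x :: ys) id = PySem.List.max? (max a x :: ys) id := by
  simp only [PySem.List.max?, List.foldl_cons]
  congr 1
  show (if id a < id x then some x else some a) = some (max a x)
  simp only [id_eq]
  split_ifs with h
  · rw [max_eq_right h.le]
  · rw [max_eq_left (not_lt.mp h)]

lemma pvMaxFive (x1 x2 x3 x4 x5 : Int) :
    (PySem.List.max? [x1, x2, x3, x4, x5] id).getD (-1) = max (max (max (max x1 x2) x3) x4) x5 := by
  rw [pvMaxCons, pvMaxCons, pvMaxCons, pvMaxCons]
  rfl

lemma pvGviSpec (w : List Char) : ∀ k j, pvGvi w k = some j →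
    j < k ∧ (w[j]?.any pvIsV) = true ∧
    ∀ l, j < l → l < k → (w[l]?.any pvIsV) = false := by
  intro k
  induction k with
  | zero => intro j h; simp [pvGvi] at h
  | succ m ih =>
    intro j h
    rw [pvGviSucc] at h
    by_cases hv : (w[m]?.any pvIsV) = true
    · rw [if_pos hv] at h
      cases Option.some.inj h
      exact ⟨Nat.lt_succ_self _, hv, fun l h1 h2 => absurd h2 (by omega)⟩
    · rw [if_neg hv] at h
      obtain ⟨h1, h2, h3⟩ := ih j h
      refine ⟨by omega, h2, fun l hl1 hl2 => ?_⟩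
      rcases Nat.lt_or_ge l m with hlm | hlm
      · exact h3 l hl1 hlm
      · have : l = m := by omega
        subst this
        exact Bool.eq_false_iff.mpr hv

def pvAc (w : List Char) : Option Nat → String
  | none => String.ofList w
  | some j => if w.getD j ' ' = w.getD (w.length - 1) ' ' then String.ofList [w.getD j ' ']
              else String.ofList (w.drop (j + 1))

lemma pvAcNone (w : List Char) : pvAc w none = String.ofList w := rfl

lemma pvAcSome (w : List Char) (j : Nat) :
    pvAc w (some j) = (if w.getD j ' ' = w.getD (w.length - 1) ' ' then String.ofList [w.getD j ' ']
      else String.ofList (w.drop (j + 1))) := rfl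

-- A's loop characterised by the greatest vowel index among the first i positions
lemma pvLoopEq (w : List Char) : ∀ i, i ≤ w.length →
    pvLoopA w i = pvAc w (pvGvi w i) := by
  intro i
  induction i with
  | zero => intro _; rfl
  | succ i ih =>
    intro hle
    have hi : i < w.length := hle
    have hget : PySem.List.pyGetD w (i : Int) ' ' = w.getD i ' ' := by
      simp [PySem.List.pyGetD_natCast]
    have hne : w ≠ [] := by intro h; subst h; simp at hi
    have hlast : PySem.List.pyGetD w (-1) ' ' = w.getD (w.length - 1) ' ' := by
      rw [PySem.List.pyGetD_neg_one w ' ' hne, List.getLast_eq_getElem]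
      simp [List.getD, List.getElem?_eq_getElem (by omega : w.length - 1 < w.length)]
    have hopt : w[i]? = some (w.getD i ' ') := by
      simp [List.getD, List.getElem?_eq_getElem hi]
    have eL : pvLoopA w (i + 1) =
        (if pvVowels.contains (PySem.List.pyGetD w (i : Int) ' ') then
          (if PySem.List.pyGetD w (i : Int) ' ' = PySem.List.pyGetD w (-1) ' ' then
            String.ofList [PySem.List.pyGetD w (i : Int) ' ']
          else String.ofList (PySem.List.slice w (some ((i : Int) + 1)) none))
        else pvLoopA w i) := rfl
    rw [eL, hget, hlast, pvGviSucc, hopt, Option.any_some]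
    by_cases hv : pvIsV (w.getD i ' ') = true
    case pos =>
      rw [if_pos hv, if_pos (show pvVowels.contains (w.getD i ' ') = true from hv), pvAcSome]
      by_cases hc : w.getD i ' ' = w.getD (w.length - 1) ' '
      · rw [if_pos hc, if_pos hc]
      · rw [if_neg hc, if_neg hc]
        congr 1
        rw [show ((i : Int) + 1) = ((i + 1 : Nat) : Int) from by push_cast; ring,
          PySem.List.slice_from_natCast]
    case neg =>
      rw [if_neg hv, if_neg (show ¬ pvVowels.contains (w.getD i ' ') = true from hv)]
      exact ih (by omega)

lemma pvCore (w : List Char) :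
    pvLoopA w w.length =
      (let idx := (PySem.List.max? (pvVowels.map (fun v => PySem.Chars.rfind w [v])) id).getD (-1)
       if 0 ≤ idx ∧ idx = (w.length : Int) - 1 then
         String.ofList [PySem.List.pyGetD w idx ' ']
       else
         String.ofList (PySem.List.slice w (some (idx + 1)) none)) := by
  have hidx : (PySem.List.max? (pvVowels.map (fun v => PySem.Chars.rfind w [v])) id).getD (-1)
      = pvOI (pvGvi w w.length) := by
    simp only [pvVowels, List.map]
    rw [pvRfindEq, pvRfindEq, pvRfindEq, pvRfindEq, pvRfindEq, pvMaxFive, pvMerge]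
  rw [pvLoopEq w w.length (le_refl _)]
  simp only [hidx]
  cases hgv : pvGvi w w.length with
  | none =>
    simp only [pvOI, pvAcNone]
    rw [if_neg (by omega)]
    rw [show (-1 + 1 : Int) = ((0 : Nat) : Int) from by norm_num,
      PySem.List.slice_from_natCast]
    rw [List.drop_zero]
  | some j =>
    obtain ⟨hj, hvj, hmax⟩ := pvGviSpec w w.length j hgv
    have hopt : w[j]? = some (w.getD j ' ') := by
      simp [List.getD, List.getElem?_eq_getElem hj]
    have hvj' : pvIsV (w.getD j ' ') = true := by
      rw [hopt, Option.any_some] at hvj; exact hvj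
    simp only [pvOI, pvAcSome]
    by_cases hje : j = w.length - 1
    · rw [if_pos (show w.getD j ' ' = w.getD (w.length - 1) ' ' by rw [hje]),
        if_pos (⟨by omega, by omega⟩ : (0:Int) ≤ (j:Int) ∧ (j:Int) = (w.length:Int) - 1)]
      congr 1
      simp [PySem.List.pyGetD_natCast]
    · have hlopt : w[w.length - 1]? = some (w.getD (w.length - 1) ' ') := by
        simp [List.getD, List.getElem?_eq_getElem (by omega : w.length - 1 < w.length)]
      have hnv : pvIsV (w.getD (w.length - 1) ' ') = false := by
        have := hmax (w.length - 1) (by omega) (by omega)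
        rw [hlopt, Option.any_some] at this; exact this
      have hneq : w.getD j ' ' ≠ w.getD (w.length - 1) ' ' := by
        intro h; rw [h, hnv] at hvj'; exact Bool.false_ne_true hvj'
      rw [if_neg hneq, if_neg (by rintro ⟨_, h⟩; omega)]
      congr 1
      rw [show ((j:Int) + 1) = ((j + 1 : Nat) : Int) by push_cast; ring,
        PySem.List.slice_from_natCast]

-- ===== VERDICT (by name: the statement is the Claim_ definition above) =====
theorem get_rythm_spec : Claim_equal_get_rythm := by
  intro line _
  unfold Spec_get_rythm get_rythm get_rythm_alt
  exact pvCore _
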